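-- pv_equiv track=rewrite | github.com/gobokuku82/Narutalk | backend/agents/supervisor/planner.py | _identify_parallel_opportunities
-- ===== SOURCE A (Python) =====
-- from typing import Dict, Any, List, Optional
--
-- def _identify_parallel_opportunities(
--
--     execution_order: List[str],
--     dependency_graph: Dict[str, List[str]]
-- ) -> List[List[str]]:
--     """병렬 실행 가능한 그룹 식별"""
--
--     parallel_groups = []
--     processed = set()
--
--     for agent in execution_order:
--         if agent in processed:
--             continue
--
--         # 같은 레벨의 독립적인 에이전트 찾기
--         group = [agent]
--         processed.add(agent)
--
--         for other in execution_order: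
--             if other in processed:
--                 continue
--
--             # 서로 의존성이 없으면 병렬 실행 가능
--             if (other not in dependency_graph.get(agent, []) and
--                 agent not in dependency_graph.get(other, [])):
--
--                 # 같은 의존성을 가지면 그룹화
--                 if dependency_graph.get(agent, []) == dependency_graph.get(other, []):
--                     group.append(other)
--                     processed.add(other)
--
--         parallel_groups.append(group)
--
--     return parallel_groups
-- ===== SOURCE B (Python) =====
-- from typing import Dict, List
--
--
-- def _identify_parallel_opportunities(
--     execution_order: List[str],
--     dependency_graph: Dict[str, List[str]]
-- ) -> List[List[str]]:
--     """Single pass: group agents by identical dependency list (tuple key);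
--     a self-dependent agent always forms a singleton group."""
--     order = []       # ('single', agent) or ('group', key) in group-creation order
--     members = {}     # tuple(deps) -> list of member agents, in order
--     seen = set()
--     for agent in execution_order:
--         if agent in seen:
--             continue
--         seen.add(agent)
--         deps = dependency_graph.get(agent, [])
--         key = tuple(deps)
--         if agent in deps:
--             order.append(('single', agent))
--         elif key in members:
--             members[key].append(agent)
--         else:
--             members[key] = [agent]
--             order.append(('group', key))
--     return [[val] if tag == 'single' else members[val] for tag, val in order]
-- ===== Notes on version B (the rewrite author's own statement) =====
-- stated objective: faster
-- what changed: Replaced the quadratic outer/inner rescan over execution_order with a single pass that groups agents by their dependency list used as a dict key (self-dependent agents become singletons), so the inner full-list scan disappears.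
import Mathlib
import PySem

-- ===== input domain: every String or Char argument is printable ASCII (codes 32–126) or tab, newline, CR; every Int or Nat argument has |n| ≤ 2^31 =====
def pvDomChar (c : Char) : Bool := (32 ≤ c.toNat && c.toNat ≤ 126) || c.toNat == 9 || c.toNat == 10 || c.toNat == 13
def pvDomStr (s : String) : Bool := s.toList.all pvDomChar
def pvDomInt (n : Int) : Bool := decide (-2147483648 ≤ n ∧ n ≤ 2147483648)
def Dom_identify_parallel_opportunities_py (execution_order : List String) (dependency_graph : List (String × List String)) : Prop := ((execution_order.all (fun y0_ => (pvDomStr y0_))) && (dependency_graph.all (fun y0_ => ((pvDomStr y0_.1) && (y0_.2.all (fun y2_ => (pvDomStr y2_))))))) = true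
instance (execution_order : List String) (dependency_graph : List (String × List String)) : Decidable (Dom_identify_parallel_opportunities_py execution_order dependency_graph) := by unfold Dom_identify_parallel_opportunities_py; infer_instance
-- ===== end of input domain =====

-- B replaces A's quadratic outer/inner rescan by one pass grouping agents under their
-- dependency list as a dict key (self-dependent agents stay singletons): same output, faster.

-- ===== PORT A =====
-- dependency_graph.get(agent, [])
def pvDeps (dependency_graph : List (String × List String)) (agent : String) : List String :=
  PySem.Dict.getD (PySem.Dict.mk dependency_graph) agent []

-- the inner 'for other in execution_order' loop of A
def pvInnerA (execution_order : List String) (dependency_graph : List (String × List String))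
    (agent : String) (st : List String × PySem.Set String) : List String × PySem.Set String :=
  execution_order.foldl (fun st2 other =>
    if PySem.Set.contains st2.2 other then st2
    else if other ∈ pvDeps dependency_graph agent then st2
    else if agent ∈ pvDeps dependency_graph other then st2
    else if pvDeps dependency_graph agent = pvDeps dependency_graph other then
      (st2.1 ++ [other], PySem.Set.add st2.2 other)
    else st2) st

def identify_parallel_opportunities_py (execution_order : List String) (dependency_graph : List (String × List String)) : List (List String) :=
  (execution_order.foldl (fun st agent =>
    if PySem.Set.contains st.2 agent then st
    else
      let r := pvInnerA execution_order dependency_graph agent ([agent], PySem.Set.add st.2 agent)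
      (st.1 ++ [r.1], r.2))
    ([], PySem.Set.empty)).1

-- ===== PORT B =====
-- state: (order of groups: inl agent = singleton, inr key = keyed group; members dict; seen set)
abbrev pvBState := List (String ⊕ List String) × PySem.Dict (List String) (List String) × PySem.Set String

def pvStepB (dependency_graph : List (String × List String)) (st : pvBState) (agent : String) : pvBState :=
  if PySem.Set.contains st.2.2 agent then st
  else
    let deps := pvDeps dependency_graph agent
    if agent ∈ deps then (st.1 ++ [Sum.inl agent], st.2.1, PySem.Set.add st.2.2 agent)
    else match PySem.Dict.get? st.2.1 deps with
      | some g => (st.1, PySem.Dict.insert st.2.1 deps (g ++ [agent]), PySem.Set.add st.2.2 agent)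
      | none => (st.1 ++ [Sum.inr deps], PySem.Dict.insert st.2.1 deps [agent], PySem.Set.add st.2.2 agent)

def identify_parallel_opportunities_py_alt (execution_order : List String) (dependency_graph : List (String × List String)) : List (List String) :=
  let st := execution_order.foldl (pvStepB dependency_graph) ([], PySem.Dict.empty, PySem.Set.empty)
  st.1.map (fun e => match e with
    | Sum.inl a => [a]
    | Sum.inr k => PySem.Dict.getD st.2.1 k [])

-- ===== PRECONDITION & SPEC =====
def Spec_identify_parallel_opportunities_py (execution_order : List String) (dependency_graph : List (String × List String)) (out : List (List String)) : Prop := out = identify_parallel_opportunities_py_alt execution_order dependency_graph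
instance (execution_order : List String) (dependency_graph : List (String × List String)) (out : List (List String)) : Decidable (Spec_identify_parallel_opportunities_py execution_order dependency_graph out) := by unfold Spec_identify_parallel_opportunities_py; infer_instance

-- ===== CLAIM (what is proved, stated in full; the proofs are below) =====
def Claim_equal_identify_parallel_opportunities_py : Prop := ∀ (execution_order : List String) (dependency_graph : List (String × List String)), Dom_identify_parallel_opportunities_py execution_order dependency_graph → Spec_identify_parallel_opportunities_py execution_order dependency_graph (identify_parallel_opportunities_py execution_order dependency_graph)

-- ===== LEMMAS AND PROOFS =====

-- the complete group that A builds for a key k (its leader's dependency list)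
def pvGrp (eo : List String) (dg : List (String × List String)) (k : List String) : List String :=
  PySem.List.dedup (eo.filter (fun x => decide (pvDeps dg x = k ∧ x ∉ k)))

def pvRender (eo : List String) (dg : List (String × List String)) : String ⊕ List String → List String
  | Sum.inl a => [a]
  | Sum.inr k => pvGrp eo dg k

-- simulation invariant between A's state and B's state after the same prefix `pre` of `eo`
def pvInv (eo pre : List String) (dg : List (String × List String))
    (stA : List (List String) × PySem.Set String) (st : pvBState) : Prop :=
  (∀ z, PySem.Set.contains stA.2 z = true ↔
      (z ∈ st.2.2 ∨ (z ∈ eo ∧ z ∉ pvDeps dg z ∧ PySem.Dict.contains st.2.1 (pvDeps dg z) = true)))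
  ∧ (∀ z, z ∈ st.2.2 ↔ z ∈ pre)
  ∧ (∀ z ∈ pre, z ∉ pvDeps dg z → PySem.Dict.contains st.2.1 (pvDeps dg z) = true)
  ∧ (∀ k, PySem.Dict.contains st.2.1 k = true →
      PySem.Dict.getD st.2.1 k [] = PySem.List.dedup (pre.filter (fun x => decide (pvDeps dg x = k ∧ x ∉ k))))
  ∧ (∀ k, Sum.inr k ∈ st.1 → PySem.Dict.contains st.2.1 k = true)
  ∧ stA.1 = st.1.map (pvRender eo dg)

lemma pvDedupAppend (l : List String) (x : String) :
    PySem.List.dedup (l ++ [x]) =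
      if x ∈ l then PySem.List.dedup l else PySem.List.dedup l ++ [x] := by
  simp only [PySem.List.dedup_eq_ofList, PySem.Set.ofList_append_singleton,
    PySem.Set.add_eq_ite, PySem.Set.mem_ofList]

lemma pvInnerA_self (eo : List String) (dg : List (String × List String)) (agent : String)
    (h : agent ∈ pvDeps dg agent) (st : List String × PySem.Set String) :
    pvInnerA eo dg agent st = st := by
  unfold pvInnerA
  induction eo generalizing st with
  | nil => rfl
  | cons y ys ih =>
    rw [List.foldl_cons]
    have hstep : (if PySem.Set.contains st.2 y then st
        else if y ∈ pvDeps dg agent then st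
        else if agent ∈ pvDeps dg y then st
        else if pvDeps dg agent = pvDeps dg y then (st.1 ++ [y], PySem.Set.add st.2 y)
        else st) = st := by
      split_ifs with c1 c2 c3 c4 <;> try rfl
      exact absurd (c4 ▸ h) c3
    rw [hstep]; exact ih st

-- characterization of A's inner loop when the leader is not self-dependent
lemma pvInnerA_char (dg : List (String × List String)) (agent : String) (k : List String)
    (hxk : agent ∉ k) (hk : pvDeps dg agent = k) (p0 : PySem.Set String) :
    ∀ (ys : List String) (g : List String) (p : PySem.Set String),
      (∀ z, PySem.Set.contains p z = true ↔ (z ∈ p0 ∨ z ∈ g)) →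
      (pvInnerA ys dg agent (g, p)).1 =
        ys.foldl (fun acc z => if z ∈ p0 ∨ z ∈ acc then acc
          else if pvDeps dg z = k ∧ z ∉ k then acc ++ [z] else acc) g
      ∧ (∀ z, PySem.Set.contains (pvInnerA ys dg agent (g, p)).2 z = true ↔
          (z ∈ p0 ∨ z ∈ ys.foldl (fun acc z => if z ∈ p0 ∨ z ∈ acc then acc
            else if pvDeps dg z = k ∧ z ∉ k then acc ++ [z] else acc) g)) := by
  intro ys
  induction ys with
  | nil =>
    intro g p hp
    exact ⟨rfl, by simpa [pvInnerA] using hp⟩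
  | cons z ys ih =>
    intro g p hp
    by_cases hz : z ∈ p0 ∨ z ∈ g
    · have hc : PySem.Set.contains p z = true := (hp z).mpr hz
      have hmem : z ∈ p := (PySem.Set.contains_iff p z).mp hc
      have h1 : pvInnerA (z :: ys) dg agent (g, p) = pvInnerA ys dg agent (g, p) := by
        simp [pvInnerA, List.foldl_cons, hmem]
      rw [h1, List.foldl_cons, if_pos hz]
      exact ih g p hp
    · have hc : PySem.Set.contains p z = false := by
        by_cases hb : PySem.Set.contains p z = true
        · exact absurd ((hp z).mp hb) hz
        · simpa using hb
      by_cases hpred : pvDeps dg z = k ∧ z ∉ k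
      · have h2 : z ∉ pvDeps dg agent := by rw [hk]; exact hpred.2
        have h3 : agent ∉ pvDeps dg z := by rw [hpred.1]; exact hxk
        have h4 : pvDeps dg agent = pvDeps dg z := by rw [hk, hpred.1]
        have hnm : z ∉ p := fun hw =>
          by rw [(PySem.Set.contains_iff p z).mpr hw] at hc; exact Bool.true_eq_false.mp hc
        have h1 : pvInnerA (z :: ys) dg agent (g, p) =
            pvInnerA ys dg agent (g ++ [z], PySem.Set.add p z) := by
          simp [pvInnerA, List.foldl_cons, hnm, hk, hpred.1, hpred.2, hxk]
        have hp' : ∀ w, PySem.Set.contains (PySem.Set.add p z) w = true ↔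
            (w ∈ p0 ∨ w ∈ g ++ [z]) := by
          intro w
          rw [PySem.Set.contains_iff, PySem.Set.mem_add p z w]
          constructor
          · rintro (hw | rfl)
            · rcases (hp w).mp ((PySem.Set.contains_iff p w).mpr hw) with h | h
              · exact Or.inl h
              · exact Or.inr (by simp [h])
            · exact Or.inr (by simp)
          · rintro (hw | hw)
            · exact Or.inl ((PySem.Set.contains_iff p w).mp ((hp w).mpr (Or.inl hw)))
            · rcases List.mem_append.mp hw with h | h
              · exact Or.inl ((PySem.Set.contains_iff p w).mp ((hp w).mpr (Or.inr h)))
              · exact Or.inr (by simpa using h)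
        rw [h1, List.foldl_cons, if_neg hz, if_pos hpred]
        exact ih (g ++ [z]) (PySem.Set.add p z) hp'
      · have h1 : pvInnerA (z :: ys) dg agent (g, p) = pvInnerA ys dg agent (g, p) := by
          simp only [pvInnerA, List.foldl_cons]
          congr 1
          split_ifs with c1 c2 c3 c4 <;> try rfl
          rw [hk] at c2 c4
          exact absurd ⟨c4.symm, c2⟩ hpred
        rw [h1, List.foldl_cons, if_neg hz, if_neg hpred]
        exact ih g p hp

lemma pvGrab_eq (dg : List (String × List String)) (k : List String) (p0 : PySem.Set String)
    (x : String) :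
    ∀ (ys g : List String), x ∈ g →
      (∀ z ∈ ys, (pvDeps dg z = k ∧ z ∉ k) → z ∈ p0 → z = x) →
      ys.foldl (fun acc z => if z ∈ p0 ∨ z ∈ acc then acc
        else if pvDeps dg z = k ∧ z ∉ k then acc ++ [z] else acc) g
      = ys.foldl (fun acc z => if pvDeps dg z = k ∧ z ∉ k then PySem.Set.add acc z else acc) g := by
  intro ys
  induction ys with
  | nil => intro g _ _; rfl
  | cons z ys ih =>
    intro g hg hzs
    rw [List.foldl_cons, List.foldl_cons]
    by_cases hpred : pvDeps dg z = k ∧ z ∉ k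
    · by_cases hzg : z ∈ g
      · rw [show (if z ∈ p0 ∨ z ∈ g then g else if pvDeps dg z = k ∧ z ∉ k then g ++ [z] else g)
            = g from if_pos (Or.inr hzg),
          show (if pvDeps dg z = k ∧ z ∉ k then PySem.Set.add g z else g) = g from by
            rw [if_pos hpred, PySem.Set.add_of_mem hzg]]
        exact ih g hg (fun w hw => hzs w (List.mem_cons_of_mem z hw))
      · have hzp : z ∉ p0 := fun hp0 => hzg (by
          rw [hzs z (List.mem_cons_self ..) hpred hp0]; exact hg)
        rw [show (if z ∈ p0 ∨ z ∈ g then g else if pvDeps dg z = k ∧ z ∉ k then g ++ [z] else g)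
            = g ++ [z] from by rw [if_neg (by tauto), if_pos hpred],
          show (if pvDeps dg z = k ∧ z ∉ k then PySem.Set.add g z else g) = g ++ [z] from by
            rw [if_pos hpred, PySem.Set.add_of_not_mem hzg]]
        exact ih (g ++ [z]) (List.mem_append_left _ hg)
          (fun w hw => hzs w (List.mem_cons_of_mem z hw))
    · rw [show (if z ∈ p0 ∨ z ∈ g then g else if pvDeps dg z = k ∧ z ∉ k then g ++ [z] else g)
            = g from by rw [if_neg hpred, ite_self],
        show (if pvDeps dg z = k ∧ z ∉ k then PySem.Set.add g z else g) = g from if_neg hpred]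
      exact ih g hg (fun w hw => hzs w (List.mem_cons_of_mem z hw))

lemma pvMain (eo : List String) (dg : List (String × List String)) :
    ∀ (rest pre : List String) stA st, eo = pre ++ rest → pvInv eo pre dg stA st →
      pvInv eo (pre ++ rest) dg
        (rest.foldl (fun st agent =>
          if PySem.Set.contains st.2 agent then st
          else
            let r := pvInnerA eo dg agent ([agent], PySem.Set.add st.2 agent)
            (st.1 ++ [r.1], r.2)) stA)
        (rest.foldl (pvStepB dg) st) := by
  intro rest
  induction rest with
  | nil => intro pre stA st heo hinv; simpa using hinv
  | cons x rest' ih =>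
    intro pre stA st heo hinv
    obtain ⟨hP, hS, hM1, hM2, hO, hR⟩ := hinv
    have hxeo : x ∈ eo := by rw [heo]; exact List.mem_append_right _ (List.mem_cons_self ..)
    have hstep : pvInv eo (pre ++ [x]) dg
        (if PySem.Set.contains stA.2 x then stA
         else
           let r := pvInnerA eo dg x ([x], PySem.Set.add stA.2 x)
           (stA.1 ++ [r.1], r.2))
        (pvStepB dg st x) := by
      by_cases hseen : x ∈ st.2.2
      · -- Case 1: agent already seen: both sides skip
        have hcs : PySem.Set.contains st.2.2 x = true := (PySem.Set.contains_iff _ _).mpr hseen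
        have hca : PySem.Set.contains stA.2 x = true := (hP x).mpr (Or.inl hseen)
        have hxpre : x ∈ pre := (hS x).mp hseen
        rw [if_pos hca]
        have hB : pvStepB dg st x = st := by simp [pvStepB, hseen]
        rw [hB]
        unfold pvInv
        refine ⟨hP, ?_, ?_, ?_, hO, hR⟩
        · intro z
          rw [hS z]
          simp only [List.mem_append, List.mem_singleton]
          exact ⟨Or.inl, fun h => h.elim id (fun h => h ▸ hxpre)⟩
        · intro z hz hzd
          rcases List.mem_append.mp hz with h | h
          · exact hM1 z h hzd
          · rw [List.mem_singleton] at h; subst h; exact hM1 z hxpre hzd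
        · intro j hj
          rw [hM2 j hj, List.filter_append]
          by_cases hq : pvDeps dg x = j ∧ x ∉ j
          · rw [show List.filter (fun x => decide (pvDeps dg x = j ∧ x ∉ j)) [x] = [x] from by
                simp [hq],
              pvDedupAppend, if_pos (List.mem_filter.mpr ⟨hxpre, by simp [hq]⟩)]
          · rw [show List.filter (fun x => decide (pvDeps dg x = j ∧ x ∉ j)) [x] = [] from by
                simp [hq], List.append_nil]
      · have hcs : PySem.Set.contains st.2.2 x = false := by
          by_cases hb : PySem.Set.contains st.2.2 x = true
          · exact absurd ((PySem.Set.contains_iff _ _).mp hb) hseen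
          · simpa using hb
        have hxpre : x ∉ pre := fun h => hseen ((hS x).mpr h)
        by_cases hca : PySem.Set.contains stA.2 x = true
        · -- Case 2: unseen, but already grabbed into an open group: A skips, B appends
          rcases (hP x).mp hca with h | ⟨_, hxd, hm⟩
          · exact absurd h hseen
          rw [if_pos hca]
          have hsome : (PySem.Dict.get? st.2.1 (pvDeps dg x)).isSome = true := by
            rw [← PySem.Dict.contains_eq_isSome_get?]; exact hm
          obtain ⟨g, hg⟩ := Option.isSome_iff_exists.mp hsome
          have hgD : PySem.Dict.getD st.2.1 (pvDeps dg x) [] = g :=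
            PySem.Dict.getD_of_get?_eq_some _ _ hg
          have hB : pvStepB dg st x =
              (st.1, PySem.Dict.insert st.2.1 (pvDeps dg x) (g ++ [x]),
               PySem.Set.add st.2.2 x) := by
            simp [pvStepB, hseen, hxd, hg]
          rw [hB]
          unfold pvInv
          dsimp only
          have hcontains : ∀ j, PySem.Dict.contains
              (PySem.Dict.insert st.2.1 (pvDeps dg x) (g ++ [x])) j = true ↔
              (j = pvDeps dg x ∨ PySem.Dict.contains st.2.1 j = true) := by
            intro j; rw [PySem.Dict.contains_insert]; simp
          have hsame : ∀ j, PySem.Dict.contains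
              (PySem.Dict.insert st.2.1 (pvDeps dg x) (g ++ [x])) j = true ↔
              PySem.Dict.contains st.2.1 j = true := by
            intro j
            exact ⟨fun h => ((hcontains j).mp h).elim (fun e => e ▸ hm) id,
              fun h => (hcontains j).mpr (Or.inr h)⟩
          refine ⟨?_, ?_, ?_, ?_, ?_, hR⟩
          · intro z
            rw [hP z]
            constructor
            · rintro (h | ⟨h1, h2, h3⟩)
              · exact Or.inl (PySem.Set.mem_add .. |>.mpr (Or.inl h))
              · exact Or.inr ⟨h1, h2, (hsame _).mpr h3⟩
            · rintro (h | ⟨h1, h2, h3⟩)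
              · rcases (PySem.Set.mem_add ..).mp h with h | rfl
                · exact Or.inl h
                · exact Or.inr ⟨hxeo, hxd, hm⟩
              · exact Or.inr ⟨h1, h2, (hsame _).mp h3⟩
          · intro z
            rw [PySem.Set.mem_add .., hS z]
            simp [List.mem_append]
          · intro z hz hzd
            rcases List.mem_append.mp hz with h | h
            · exact (hsame _).mpr (hM1 z h hzd)
            · rw [List.mem_singleton] at h; subst h
              exact (hcontains _).mpr (Or.inl rfl)
          · intro j hj
            by_cases hjx : j = pvDeps dg x
            · subst hjx
              rw [PySem.Dict.getD_insert_self, List.filter_append,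
                show List.filter (fun y => decide (pvDeps dg y = pvDeps dg x ∧ y ∉ pvDeps dg x)) [x]
                    = [x] from by simp [hxd],
                pvDedupAppend, if_neg (fun h => hxpre (List.mem_filter.mp h).1)]
              rw [← hM2 _ hm, hgD]
            · rw [PySem.Dict.getD_insert_of_ne _ _ _ hjx,
                hM2 j ((hsame j).mp hj), List.filter_append,
                show List.filter (fun y => decide (pvDeps dg y = j ∧ y ∉ j)) [x] = [] from by
                  simp only [List.filter_eq_nil_iff]
                  intro a ha hq
                  rw [List.mem_singleton] at ha; subst ha
                  rw [decide_eq_true_eq] at hq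
                  exact hjx hq.1.symm,
                List.append_nil]
          · intro j hj
            exact (hsame j).mpr (hO j hj)
        · -- A is about to open a new group (or a singleton)
          have hcaf : PySem.Set.contains stA.2 x = false := by
            by_cases hb : PySem.Set.contains stA.2 x = true
            · exact absurd hb hca
            · simpa using hb
          rw [if_neg hca]
          have hmemA : ∀ z, z ∈ PySem.Set.add stA.2 x ↔
              (PySem.Set.contains stA.2 z = true ∨ z = x) := by
            intro z
            rw [PySem.Set.mem_add .., PySem.Set.contains_iff]
          by_cases hself : x ∈ pvDeps dg x
          · -- Case 3: self-dependent: singleton group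
            have hA : pvInnerA eo dg x ([x], PySem.Set.add stA.2 x) =
                ([x], PySem.Set.add stA.2 x) := pvInnerA_self eo dg x hself _
            have hB : pvStepB dg st x =
                (st.1 ++ [Sum.inl x], st.2.1, PySem.Set.add st.2.2 x) := by
              simp [pvStepB, hseen, hself]
            rw [hB]
            unfold pvInv
            dsimp only
            rw [hA]
            refine ⟨?_, ?_, ?_, ?_, ?_, ?_⟩
            · intro z
              rw [(PySem.Set.contains_iff ..), hmemA z]
              constructor
              · rintro (h | rfl)
                · rcases (hP z).mp h with h | h
                  · exact Or.inl ((PySem.Set.mem_add ..).mpr (Or.inl h))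
                  · exact Or.inr h
                · exact Or.inl ((PySem.Set.mem_add ..).mpr (Or.inr rfl))
              · rintro (h | ⟨h1, h2, h3⟩)
                · rcases (PySem.Set.mem_add ..).mp h with h | rfl
                  · exact Or.inl ((hP z).mpr (Or.inl h))
                  · exact Or.inr rfl
                · exact Or.inl ((hP z).mpr (Or.inr ⟨h1, h2, h3⟩))
            · intro z
              rw [PySem.Set.mem_add .., hS z]
              simp [List.mem_append]
            · intro z hz hzd
              rcases List.mem_append.mp hz with h | h
              · exact hM1 z h hzd
              · rw [List.mem_singleton] at h; subst h; exact absurd hself hzd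
            · intro j hj
              rw [hM2 j hj, List.filter_append,
                show List.filter (fun y => decide (pvDeps dg y = j ∧ y ∉ j)) [x] = [] from by
                  simp only [List.filter_eq_nil_iff]
                  intro a ha hq
                  rw [List.mem_singleton] at ha; subst ha
                  rw [decide_eq_true_eq] at hq
                  exact hq.2 (hq.1 ▸ hself),
                List.append_nil]
            · intro j hj
              rcases List.mem_append.mp hj with h | h
              · exact hO j h
              · simp at h
            · dsimp only
              rw [hR, List.map_append]
              rfl
          · -- Case 4: A opens a new keyed group and grabs the whole of it
            have hnm : PySem.Dict.contains st.2.1 (pvDeps dg x) = false := by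
              by_cases hb : PySem.Dict.contains st.2.1 (pvDeps dg x) = true
              · exact absurd ((hP x).mpr (Or.inr ⟨hxeo, hself, hb⟩)) hca
              · simpa using hb
            have hgnone : PySem.Dict.get? st.2.1 (pvDeps dg x) = none := by
              rcases h : PySem.Dict.get? st.2.1 (pvDeps dg x) with _ | g
              · rfl
              · exfalso
                rw [PySem.Dict.contains_eq_isSome_get?, h] at hnm
                simp at hnm
            have hB : pvStepB dg st x =
                (st.1 ++ [Sum.inr (pvDeps dg x)],
                 PySem.Dict.insert st.2.1 (pvDeps dg x) [x],
                 PySem.Set.add st.2.2 x) := by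
              simp [pvStepB, hseen, hself, hgnone]
            rw [hB]
            unfold pvInv
            dsimp only
            -- characterize A's inner loop
            have hp : ∀ z, PySem.Set.contains (PySem.Set.add stA.2 x) z = true ↔
                (z ∈ PySem.Set.add stA.2 x ∨ z ∈ ([x] : List String)) := by
              intro z
              rw [PySem.Set.contains_iff]
              exact ⟨Or.inl, fun h => h.elim id (fun h => by
                rw [List.mem_singleton] at h
                exact h ▸ (PySem.Set.mem_add ..).mpr (Or.inr rfl))⟩
            obtain ⟨hr1, hr2⟩ := pvInnerA_char dg x (pvDeps dg x) hself rfl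
              (PySem.Set.add stA.2 x) eo [x] (PySem.Set.add stA.2 x) hp
            have hzs : ∀ z ∈ eo, (pvDeps dg z = pvDeps dg x ∧ z ∉ pvDeps dg x) →
                z ∈ PySem.Set.add stA.2 x → z = x := by
              intro z _ hpred hz
              rcases (hmemA z).mp hz with h | h
              · exfalso
                rcases (hP z).mp h with h | ⟨_, _, h3⟩
                · have hzpre := (hS z).mp h
                  have := hM1 z hzpre (by rw [hpred.1]; exact hpred.2)
                  rw [hpred.1] at this
                  exact absurd this (by simp [hnm])
                · rw [hpred.1] at h3
                  exact absurd h3 (by simp [hnm])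
              · exact h
            have hgrab := pvGrab_eq dg (pvDeps dg x) (PySem.Set.add stA.2 x) x eo [x]
              (List.mem_singleton_self x) hzs
            -- the grabbed group is exactly pvGrp
            have hfpre : pre.filter (fun z => decide (pvDeps dg z = pvDeps dg x ∧ z ∉ pvDeps dg x)) = [] := by
              rw [List.filter_eq_nil_iff]
              intro y hy hq
              simp only [decide_eq_true_eq] at hq
              have := hM1 y hy (by rw [hq.1]; exact hq.2)
              rw [hq.1] at this
              exact absurd this (by simp [hnm])
            have hfeo : eo.filter (fun z => decide (pvDeps dg z = pvDeps dg x ∧ z ∉ pvDeps dg x)) =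
                x :: rest'.filter (fun z => decide (pvDeps dg z = pvDeps dg x ∧ z ∉ pvDeps dg x)) := by
              rw [heo, List.filter_append, hfpre, List.nil_append, List.filter_cons,
                if_pos (by simp [hself])]
            have hstep2 : eo.foldl (fun acc z =>
                  if pvDeps dg z = pvDeps dg x ∧ z ∉ pvDeps dg x then PySem.Set.add acc z else acc) [x]
                = (eo.filter (fun z => decide (pvDeps dg z = pvDeps dg x ∧ z ∉ pvDeps dg x))).foldl
                    PySem.Set.add [x] := by
              rw [List.foldl_filter]
              simp only [decide_eq_true_eq]
            have hgrp : (pvInnerA eo dg x ([x], PySem.Set.add stA.2 x)).1 =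
                pvGrp eo dg (pvDeps dg x) := by
              rw [hr1, hgrab, hstep2, hfeo, List.foldl_cons,
                PySem.Set.add_of_mem (List.mem_singleton_self x)]
              rw [pvGrp, PySem.List.dedup_eq_ofList, hfeo, PySem.Set.ofList_eq_foldl,
                List.foldl_cons]
              rfl
            refine ⟨?_, ?_, ?_, ?_, ?_, ?_⟩
            · intro z
              rw [hr2 z, ← hr1, hgrp]
              constructor
              · rintro (h | h)
                · rcases (hmemA z).mp h with h | rfl
                  · rcases (hP z).mp h with h | ⟨h1, h2, h3⟩
                    · exact Or.inl ((PySem.Set.mem_add ..).mpr (Or.inl h))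
                    · refine Or.inr ⟨h1, h2, ?_⟩
                      rw [PySem.Dict.contains_insert]
                      simp only [Bool.or_eq_true, beq_iff_eq]
                      exact Or.inr h3
                  · exact Or.inl ((PySem.Set.mem_add ..).mpr (Or.inr rfl))
                · rw [pvGrp, PySem.List.dedup_eq_ofList, PySem.Set.mem_ofList,
                    List.mem_filter, decide_eq_true_eq] at h
                  refine Or.inr ⟨h.1, by rw [h.2.1]; exact h.2.2, ?_⟩
                  rw [h.2.1, PySem.Dict.contains_insert]
                  simp only [Bool.or_eq_true, beq_iff_eq]
                  exact Or.inl trivial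
              · rintro (h | ⟨h1, h2, h3⟩)
                · rcases (PySem.Set.mem_add ..).mp h with h | rfl
                  · exact Or.inl ((hmemA z).mpr (Or.inl ((hP z).mpr (Or.inl h))))
                  · exact Or.inl ((PySem.Set.mem_add ..).mpr (Or.inr rfl))
                · rw [PySem.Dict.contains_insert] at h3
                  simp only [Bool.or_eq_true, beq_iff_eq] at h3
                  rcases h3 with h3 | h3
                  · refine Or.inr ?_
                    rw [pvGrp, PySem.List.dedup_eq_ofList, PySem.Set.mem_ofList,
                      List.mem_filter, decide_eq_true_eq]
                    exact ⟨h1, h3, by rw [← h3]; exact h2⟩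
                  · exact Or.inl ((hmemA z).mpr (Or.inl ((hP z).mpr (Or.inr ⟨h1, h2, h3⟩))))
            · intro z
              rw [PySem.Set.mem_add .., hS z]
              simp [List.mem_append]
            · intro z hz hzd
              rcases List.mem_append.mp hz with h | h
              · have := hM1 z h hzd
                rw [PySem.Dict.contains_insert]
                simp only [Bool.or_eq_true, beq_iff_eq]
                exact Or.inr this
              · rw [List.mem_singleton] at h; subst h
                rw [PySem.Dict.contains_insert]
                simp only [Bool.or_eq_true, beq_iff_eq]
                exact Or.inl trivial
            · intro j hj
              by_cases hjx : j = pvDeps dg x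
              · subst hjx
                rw [PySem.Dict.getD_insert_self, List.filter_append, hfpre,
                  List.nil_append,
                  show List.filter (fun y => decide (pvDeps dg y = pvDeps dg x ∧ y ∉ pvDeps dg x)) [x]
                      = [x] from by simp [hself]]
                rfl
              · rw [PySem.Dict.getD_insert_of_ne _ _ _ hjx]
                rw [PySem.Dict.contains_insert] at hj
                simp only [Bool.or_eq_true, beq_iff_eq] at hj
                rcases hj with hj | hj
                · exact absurd hj hjx
                rw [hM2 j hj, List.filter_append,
                  show List.filter (fun y => decide (pvDeps dg y = j ∧ y ∉ j)) [x] = [] from by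
                    simp only [List.filter_eq_nil_iff]
                    intro a ha hq
                    rw [List.mem_singleton] at ha; subst ha
                    rw [decide_eq_true_eq] at hq
                    exact hjx hq.1.symm,
                  List.append_nil]
            · intro j hj
              rcases List.mem_append.mp hj with h | h
              · rw [PySem.Dict.contains_insert]
                simp only [Bool.or_eq_true, beq_iff_eq]
                exact Or.inr (hO j h)
              · simp only [List.mem_singleton, Sum.inr.injEq] at h; subst h
                rw [PySem.Dict.contains_insert]
                simp only [Bool.or_eq_true, beq_iff_eq]
                exact Or.inl trivial
            · dsimp only
              rw [hgrp, hR, List.map_append]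
              rfl
    have h2 := ih (pre ++ [x]) _ _ (by rw [heo]; simp) hstep
    rw [List.foldl_cons, List.foldl_cons]
    simpa using h2

-- ===== VERDICT (by name: the statement is the Claim_ definition above) =====
theorem identify_parallel_opportunities_py_spec : Claim_equal_identify_parallel_opportunities_py := by
  intro eo dg _
  unfold Spec_identify_parallel_opportunities_py
  have h0 : pvInv eo [] dg ([], PySem.Set.empty) ([], PySem.Dict.empty, PySem.Set.empty) := by
    refine ⟨?_, ?_, ?_, ?_, ?_, rfl⟩
    · intro z
      simp [PySem.Set.empty, PySem.Dict.contains_empty]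
    · intro z; exact Iff.rfl
    · intro z hz; exact absurd hz (List.not_mem_nil)
    · intro k hk
      exact absurd hk (by simp [PySem.Dict.contains_empty])
    · intro k hk; exact absurd hk (List.not_mem_nil)
  have h := pvMain eo dg eo [] ([], PySem.Set.empty) ([], PySem.Dict.empty, PySem.Set.empty)
    (List.nil_append eo).symm h0
  rw [List.nil_append] at h
  obtain ⟨_, _, _, hM2, hO, hR⟩ := h
  unfold identify_parallel_opportunities_py identify_parallel_opportunities_py_alt
  dsimp only
  rw [hR]
  refine List.map_congr_left ?_
  intro e he
  cases e with
  | inl a => rfl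
  | inr j =>
    have hc := hO j he
    show pvGrp eo dg j = _
    rw [pvGrp]
    exact (hM2 j hc).symm
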